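-- pv_equiv track=rewrite | github.com/lyq12345/ThesisCodeLibrary | tests/decision_maker/new/utils.py | calculate_effective_rate
-- ===== SOURCE A (Python) =====
-- def calculate_effective_rate(determine_sequence, continous_threshold, time_unit):
--     current_length = 0
--     total_length = 0
--     for item in determine_sequence:
--         if item == 1:
--             current_length += 1
--         else:
--             if current_length >= continous_threshold:
--                 total_length += (current_length-1)*time_unit
--             current_length = 0
--
--     if current_length >= continous_threshold:
--         total_length += (current_length-1)*time_unit
--     return total_length
-- ===== SOURCE B (Python) =====
-- def calculate_effective_rate(determine_sequence, continous_threshold, time_unit):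
--     # separator positions (non-1 items) plus a sentinel at the end;
--     # each run length is the gap between consecutive separators
--     cuts = [i for i, item in enumerate(determine_sequence) if item != 1]
--     cuts.append(len(determine_sequence))
--     prev = -1
--     total = 0
--     for c in cuts:
--         run = c - prev - 1
--         if run >= continous_threshold:
--             total += (run - 1) * time_unit
--         prev = c
--     return total
-- ===== Notes on version B (the rewrite author's own statement) =====
-- stated objective: alternative
-- what changed: B replaces the hand-maintained current_length counter and the duplicated trailing-run check with a boundary-index decomposition: it collects the positions of non-1 separators plus an end sentinel and derives each run length as the gap between consecutive separators, applying the threshold test once per gap.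
import Mathlib
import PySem

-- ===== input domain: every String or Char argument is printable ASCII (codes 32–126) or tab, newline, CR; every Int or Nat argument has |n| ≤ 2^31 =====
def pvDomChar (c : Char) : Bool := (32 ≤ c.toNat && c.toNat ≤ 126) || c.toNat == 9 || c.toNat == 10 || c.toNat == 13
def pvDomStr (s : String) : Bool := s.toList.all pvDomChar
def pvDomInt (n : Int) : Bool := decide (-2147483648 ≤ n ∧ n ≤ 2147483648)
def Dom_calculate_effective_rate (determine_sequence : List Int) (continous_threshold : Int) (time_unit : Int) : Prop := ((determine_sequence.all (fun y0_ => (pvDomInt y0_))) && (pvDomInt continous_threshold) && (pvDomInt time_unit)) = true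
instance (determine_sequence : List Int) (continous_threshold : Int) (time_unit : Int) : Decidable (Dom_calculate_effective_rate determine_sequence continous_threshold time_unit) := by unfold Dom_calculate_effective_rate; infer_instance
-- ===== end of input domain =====

-- B replaces A's running current_length counter (with its duplicated trailing-run check)
-- by a boundary decomposition: positions of non-1 separators plus an end sentinel,
-- each run length recovered as the gap between consecutive separators. Objective: alternative.

-- ===== PORT A =====
-- state = (current_length, total_length)
def calculate_effective_rate (determine_sequence : List Int) (continous_threshold : Int) (time_unit : Int) : Int :=
  let s := determine_sequence.foldl
    (fun (st : Int × Int) item =>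
      if item = 1 then (st.1 + 1, st.2)
      else (0, if continous_threshold ≤ st.1 then st.2 + (st.1 - 1) * time_unit else st.2))
    (0, 0)
  if continous_threshold ≤ s.1 then s.2 + (s.1 - 1) * time_unit else s.2

-- ===== PORT B =====
-- cuts = [i for i, item in enumerate(seq) if item != 1] + [len(seq)]; fold state = (prev, total)
def calculate_effective_rate_alt (determine_sequence : List Int) (continous_threshold : Int) (time_unit : Int) : Int :=
  let cuts := (determine_sequence.zipIdx.filterMap
      (fun p => if p.1 ≠ 1 then some ((p.2 : Int)) else none)) ++ [(determine_sequence.length : Int)]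
  let s := cuts.foldl
    (fun (st : Int × Int) c =>
      let run := c - st.1 - 1
      (c, if continous_threshold ≤ run then st.2 + (run - 1) * time_unit else st.2))
    (-1, 0)
  s.2

-- ===== PRECONDITION & SPEC =====
def Spec_calculate_effective_rate (determine_sequence : List Int) (continous_threshold : Int) (time_unit : Int) (out : Int) : Prop := out = calculate_effective_rate_alt determine_sequence continous_threshold time_unit
instance (determine_sequence : List Int) (continous_threshold : Int) (time_unit : Int) (out : Int) : Decidable (Spec_calculate_effective_rate determine_sequence continous_threshold time_unit out) := by unfold Spec_calculate_effective_rate; infer_instance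

-- ===== CLAIM (what is proved, stated in full; the proofs are below) =====
def Claim_equal_calculate_effective_rate : Prop := ∀ (determine_sequence : List Int) (continous_threshold : Int) (time_unit : Int), Dom_calculate_effective_rate determine_sequence continous_threshold time_unit → Spec_calculate_effective_rate determine_sequence continous_threshold time_unit (calculate_effective_rate determine_sequence continous_threshold time_unit)

-- ===== LEMMAS AND PROOFS =====

-- Invariant: if B's fold state is (k - cur - 1, total) before scanning the cuts of l
-- (indices offset by k, sentinel k + l.length), its final answer equals A's finishing
-- step applied to A's fold of l from state (cur, total).
theorem pv_key (continous_threshold time_unit : Int) (l : List Int) :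
    ∀ (k : Nat) (cur total : Int),
      (((l.zipIdx k).filterMap
          (fun p => if p.1 ≠ 1 then some ((p.2 : Int)) else none) ++ [((k + l.length : Nat) : Int)]).foldl
        (fun (st : Int × Int) c =>
          let run := c - st.1 - 1
          (c, if continous_threshold ≤ run then st.2 + (run - 1) * time_unit else st.2))
        ((k : Int) - cur - 1, total)).2
      =
      (let s := l.foldl
        (fun (st : Int × Int) item =>
          if item = 1 then (st.1 + 1, st.2)
          else (0, if continous_threshold ≤ st.1 then st.2 + (st.1 - 1) * time_unit else st.2))
        (cur, total)
      if continous_threshold ≤ s.1 then s.2 + (s.1 - 1) * time_unit else s.2) := by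
  induction l with
  | nil =>
    intro k cur total
    simp only [List.zipIdx_nil, List.filterMap_nil, List.nil_append, List.foldl_cons,
      List.foldl_nil, List.length_nil, Nat.add_zero]
    have h1 : (k : Int) - ((k : Int) - cur - 1) - 1 = cur := by ring
    simp [h1]
  | cons x xs ih =>
    intro k cur total
    by_cases hx : x = 1
    · subst hx
      simp only [List.zipIdx_cons, List.filterMap_cons, List.foldl_cons, List.length_cons]
      have hlen : (k + (xs.length + 1) : Nat) = ((k + 1) + xs.length : Nat) := by omega
      have hprev : (k : Int) - cur - 1 = ((k + 1 : Nat) : Int) - (cur + 1) - 1 := by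
        push_cast; ring
      simp only [ne_eq, not_true_eq_false, if_false, hlen, hprev]
      rw [ih (k + 1) (cur + 1) total]
      simp
    · simp only [List.zipIdx_cons, List.filterMap_cons, List.foldl_cons, List.length_cons,
        ne_eq, hx, not_false_eq_true, if_true, List.cons_append, List.foldl_cons]
      have h1 : (k : Int) - ((k : Int) - cur - 1) - 1 = cur := by ring
      have hlen : (k + (xs.length + 1) : Nat) = ((k + 1) + xs.length : Nat) := by omega
      have hprev : (k : Int) = ((k + 1 : Nat) : Int) - 0 - 1 := by push_cast; ring
      simp only [h1, hlen]
      rw [show ((k : Int), if continous_threshold ≤ cur then total + (cur - 1) * time_unit else total)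
            = (((k + 1 : Nat) : Int) - 0 - 1,
               if continous_threshold ≤ cur then total + (cur - 1) * time_unit else total) from by
        rw [← hprev]]
      rw [ih (k + 1) 0 (if continous_threshold ≤ cur then total + (cur - 1) * time_unit else total)]
      simp

-- ===== VERDICT (by name: the statement is the Claim_ definition above) =====
theorem calculate_effective_rate_spec : Claim_equal_calculate_effective_rate := by
  intro seq th tu _
  unfold Spec_calculate_effective_rate calculate_effective_rate calculate_effective_rate_alt
  have h := pv_key th tu seq 0 0 0
  simp only [Nat.zero_add, Nat.cast_zero] at h
  rw [show ((-1 : Int), (0 : Int)) = ((0 : Int) - 0 - 1, (0 : Int)) from by norm_num]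
  exact h.symm
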